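-- pv_equiv track=rewrite | github.com/Azim-Islam/Problem-Solving-DSA | USACO.GUIDE/SILVER/Graph Traversal/USACO_992.py | check
-- ===== SOURCE A (Python) =====
-- def check(adj, arr, min_width):
--     visited = [0]*(len(arr)+1)
--     for i in range(1, len(arr)+1):
--         if not visited[i]:
--             stack = [i]
--             visited[i] = i
--             while stack:
--                 v = stack.pop()
--                 for n in adj[v]:
--                     if not visited[n[0]] and n[1] >= min_width:
--                         visited[n[0]] = i
--                         stack.append(n[0])
--
--     for i, v in enumerate(arr):
--         if not(visited[i+1] == visited[v]):
--             return False
--     return True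
-- ===== SOURCE B (Python) =====
-- def check(adj, arr, min_width):
--     # BFS flood-fill with a pointer-queue instead of A's pop-stack; labels components by root id.
--     n = len(arr)
--     label = [0] * (n + 1)
--     for root in range(1, n + 1):
--         if label[root]:
--             continue
--         label[root] = root
--         order = [root]
--         head = 0
--         while head < len(order):
--             for m, w in adj[order[head]]:
--                 if w >= min_width and not label[m]:
--                     label[m] = root
--                     order.append(m)
--             head += 1
--     return all(label[i + 1] == label[v] for i, v in enumerate(arr))
-- ===== Notes on version B (the rewrite author's own statement) =====
-- stated objective: alternative
-- what changed: Replaces A's LIFO stack flood-fill (pop from the end, depth-first) with a FIFO pointer-queue breadth-first flood-fill and replaces the early-return final loop with an all(...) over enumerate; labels are proved order-independent.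
-- outside the precondition, e.g. on check({0: [], 1: [(0, 5)]}, [1], 3): A returns True, B returns True
import Mathlib
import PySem

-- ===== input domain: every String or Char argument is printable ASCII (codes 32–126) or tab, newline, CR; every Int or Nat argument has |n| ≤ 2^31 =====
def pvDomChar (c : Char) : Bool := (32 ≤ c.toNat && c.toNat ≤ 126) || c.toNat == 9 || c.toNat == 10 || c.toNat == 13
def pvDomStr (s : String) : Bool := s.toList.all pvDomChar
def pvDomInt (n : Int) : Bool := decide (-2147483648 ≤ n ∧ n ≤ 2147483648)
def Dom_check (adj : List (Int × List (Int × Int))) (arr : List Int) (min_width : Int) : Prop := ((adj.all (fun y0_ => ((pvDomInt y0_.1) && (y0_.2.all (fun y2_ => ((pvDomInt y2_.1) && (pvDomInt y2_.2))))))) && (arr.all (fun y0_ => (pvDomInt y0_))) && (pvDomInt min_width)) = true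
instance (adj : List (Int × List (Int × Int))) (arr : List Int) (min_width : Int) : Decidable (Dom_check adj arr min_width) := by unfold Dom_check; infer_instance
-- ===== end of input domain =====

-- B replaces A's LIFO-stack depth-first flood-fill by a FIFO pointer-queue breadth-first flood-fill
-- (and the early-return final loop by an all(...)); the component labels are proved order-independent.

-- ===== PORT A =====
-- adj[k] (dict lookup = first match); KeyError → [] (total form; Pre_check keeps lookups on present keys)
def lookupAdj (adj : List (Int × List (Int × Int))) (k : Int) : List (Int × Int) :=
  match adj.find? (fun p => p.1 == k) with
  | some p => p.2
  | none => []

-- the 'while stack:' loop of A; head of the list = top of the Python stack (append/pop at the end).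
-- fuel only makes the recursion total: inside Pre_check the fuel passed below is proved sufficient.
def stackLoop (adj : List (Int × List (Int × Int))) (min_width i : Int) :
    Nat → List Int → List Int → List Int
  | 0, visited, _ => visited
  | _ + 1, visited, [] => visited
  | fuel + 1, visited, v :: rest =>
    let s := (lookupAdj adj v).foldl
      (fun (st : List Int × List Int) q =>
        if PySem.List.pyGetD st.1 q.1 1 == 0 && decide (q.2 ≥ min_width) then
          (PySem.List.pySetD st.1 q.1 i, q.1 :: st.2)
        else st)
      (visited, rest)
    stackLoop adj min_width i fuel s.1 s.2

-- 'for i, v in enumerate(arr): if not (...): return False' / 'return True'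
def checkPairs (visited : List Int) : List (Int × Int) → Bool
  | [] => true
  | (j, v) :: rest =>
    if PySem.List.pyGetD visited (j + 1) 0 == PySem.List.pyGetD visited v 0 then
      checkPairs visited rest
    else false

def check (adj : List (Int × List (Int × Int))) (arr : List Int) (min_width : Int) : Bool :=
  let visited0 : List Int := List.replicate (arr.length + 1) 0
  let visited := (PySem.List.pyRange 1 (PySem.List.len arr + 1) 1).foldl
    (fun visited i =>
      if PySem.List.pyGetD visited i 1 == 0 then
        stackLoop adj min_width i (2 * visited.length + 1) (PySem.List.pySetD visited i i) [i]
      else visited)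
    visited0
  checkPairs visited (PySem.List.enumerate arr 0)

-- ===== PORT B =====
-- adj[order[head]] in B (total form as in A's port)
def adjOf (adj : List (Int × List (Int × Int))) (k : Int) : List (Int × Int) :=
  ((adj.find? (fun p => p.1 == k)).map Prod.snd).getD []

-- B's pointer-queue BFS: the argument list is order[head:]; order.append = append at the end.
def bfsLoop (adj : List (Int × List (Int × Int))) (min_width root : Int) :
    Nat → List Int → List Int → List Int
  | 0, label, _ => label
  | _ + 1, label, [] => label
  | fuel + 1, label, v :: queue =>
    let s := (adjOf adj v).foldl
      (fun (st : List Int × List Int) q =>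
        if decide (q.2 ≥ min_width) && (PySem.List.pyGetD st.1 q.1 1 == 0) then
          (PySem.List.pySetD st.1 q.1 root, st.2 ++ [q.1])
        else st)
      (label, queue)
    bfsLoop adj min_width root fuel s.1 s.2

def check_alt (adj : List (Int × List (Int × Int))) (arr : List Int) (min_width : Int) : Bool :=
  let label := (PySem.List.pyRange 1 (PySem.List.len arr + 1) 1).foldl
    (fun label root =>
      if PySem.List.pyGetD label root 1 == 0 then
        bfsLoop adj min_width root (2 * label.length + 1) (PySem.List.pySetD label root root) [root]
      else label)
    (List.replicate (arr.length + 1) 0)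
  (PySem.List.enumerate arr 0).all
    (fun p => PySem.List.pyGetD label (p.1 + 1) 0 == PySem.List.pyGetD label p.2 0)

-- ===== PRECONDITION & SPEC =====
-- Pre_check excludes inputs where the Python raises (a node 1..len(arr) missing from adj, an index
-- off the visited list) and, conservatively, adjacency entries that point outside 1..len(arr) with
-- width ≥ min_width or outside the wraparound range of visited, on which A's returning at all
-- depends on which dict keys happen to exist; inside Pre_check A always returns.
def Pre_check (adj : List (Int × List (Int × Int))) (arr : List Int) (min_width : Int) : Prop :=
  (∀ i ∈ PySem.List.pyRange 1 ((arr.length : Int) + 1) 1, (adj.find? (fun p => p.1 == i)).isSome = true) ∧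
  (∀ p ∈ adj, 1 ≤ p.1 → p.1 ≤ (arr.length : Int) → ∀ q ∈ p.2,
      -((arr.length : Int) + 1) ≤ q.1 ∧ q.1 ≤ (arr.length : Int) ∧ (q.2 ≥ min_width → 1 ≤ q.1)) ∧
  (∀ v ∈ arr, -((arr.length : Int) + 1) ≤ v ∧ v ≤ (arr.length : Int))
instance (adj : List (Int × List (Int × Int))) (arr : List Int) (min_width : Int) : Decidable (Pre_check adj arr min_width) := by unfold Pre_check; infer_instance

def pvWitness_check : (List (Int × List (Int × Int))) × List Int × Int :=
  ([(1, [(2, 5)]), (2, [(1, 5)])], [2, 1], 3)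

def Spec_check (adj : List (Int × List (Int × Int))) (arr : List Int) (min_width : Int) (out : Bool) : Prop := out = check_alt adj arr min_width
instance (adj : List (Int × List (Int × Int))) (arr : List Int) (min_width : Int) (out : Bool) : Decidable (Spec_check adj arr min_width out) := by unfold Spec_check; infer_instance

-- ===== CLAIM (what is proved, stated in full; the proofs are below) =====
def Claim_equal_check : Prop := ∀ (adj : List (Int × List (Int × Int))) (arr : List Int) (min_width : Int), Dom_check adj arr min_width → Pre_check adj arr min_width → Spec_check adj arr min_width (check adj arr min_width)

-- ===== LEMMAS AND PROOFS =====

-- value of the visited/label array at (Int) position j; 1 is a harmless out-of-range default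
def gv (W : List Int) (j : Int) : Int := PySem.List.pyGetD W j 1

-- number of still-unlabelled slots (the fuel measure)
def zc (W : List Int) : Nat := W.countP (fun x => x == 0)

-- edges of weight ≥ min_width out of nodes 1..n stay inside 1..n
def AdjOK (adj : List (Int × List (Int × Int))) (min_width : Int) (n : Nat) : Prop :=
  ∀ u : Int, 1 ≤ u → u ≤ (n : Int) → ∀ q ∈ lookupAdj adj u, min_width ≤ q.2 → 1 ≤ q.1 ∧ q.1 ≤ (n : Int)

-- nodes reachable from root i through nodes unlabelled in V along edges of weight ≥ min_width
inductive Reach (adj : List (Int × List (Int × Int))) (min_width : Int) (V : List Int) (i : Int) : Int → Prop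
  | base : Reach adj min_width V i i
  | step {u m w : Int} : Reach adj min_width V i u → (m, w) ∈ lookupAdj adj u →
      min_width ≤ w → gv V m = 0 → Reach adj min_width V i m

-- every ≥-min_width neighbour of u is already labelled in W
def ClosedAt (adj : List (Int × List (Int × Int))) (min_width : Int) (W : List Int) (u : Int) : Prop :=
  ∀ q ∈ lookupAdj adj u, min_width ≤ q.2 → gv W q.1 ≠ 0

-- the invariant shared by both worklist loops
def LoopInv (adj : List (Int × List (Int × Int))) (min_width : Int) (n : Nat) (V : List Int) (i : Int)
    (W : List Int) (st : List Int) : Prop :=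
  W.length = V.length ∧
  (∀ j : Int, 0 ≤ j → j ≤ (n : Int) → gv W j = gv V j ∨ (gv W j = i ∧ Reach adj min_width V i j)) ∧
  (∀ v ∈ st, 1 ≤ v ∧ v ≤ (n : Int) ∧ Reach adj min_width V i v ∧ gv W v = i) ∧
  st.Nodup ∧
  gv W i = i

-- one neighbour-processing step, with an abstract worklist insertion
def stepf (min_width i : Int) (push : List Int → Int → List Int)
    (st : List Int × List Int) (q : Int × Int) : List Int × List Int :=
  if PySem.List.pyGetD st.1 q.1 1 == 0 && decide (q.2 ≥ min_width) then
    (PySem.List.pySetD st.1 q.1 i, push st.2 q.1)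
  else st

-- generic worklist loop; push decides where fresh nodes enter the worklist
def wl (adj : List (Int × List (Int × Int))) (min_width i : Int) (push : List Int → Int → List Int) :
    Nat → List Int → List Int → List Int
  | 0, W, _ => W
  | _ + 1, W, [] => W
  | fuel + 1, W, v :: rest =>
    let s := (lookupAdj adj v).foldl (stepf min_width i push) (W, rest)
    wl adj min_width i push fuel s.1 s.2

theorem stackLoop_eq_wl (adj : List (Int × List (Int × Int))) (min_width i : Int) :
    ∀ (fuel : Nat) (W st : List Int),
    stackLoop adj min_width i fuel W st = wl adj min_width i (fun s x => x :: s) fuel W st := by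
  intro fuel
  induction fuel with
  | zero => intro W st; rfl
  | succ f ih =>
    intro W st
    cases st with
    | nil => rfl
    | cons v rest =>
      simp only [stackLoop, wl]
      exact ih _ _

theorem adjOf_eq_lookupAdj (adj : List (Int × List (Int × Int))) (k : Int) :
    adjOf adj k = lookupAdj adj k := by
  unfold adjOf lookupAdj
  cases h : adj.find? (fun p => p.1 == k) <;> rfl

theorem bfsLoop_eq_wl (adj : List (Int × List (Int × Int))) (min_width i : Int) :
    ∀ (fuel : Nat) (W st : List Int),
    bfsLoop adj min_width i fuel W st = wl adj min_width i (fun s x => s ++ [x]) fuel W st := by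
  intro fuel
  induction fuel with
  | zero => intro W st; rfl
  | succ f ih =>
    intro W st
    cases st with
    | nil => rfl
    | cons v rest =>
      simp only [bfsLoop, wl, adjOf_eq_lookupAdj]
      have hf : (fun (st : List Int × List Int) (q : Int × Int) =>
          if decide (q.2 ≥ min_width) && (PySem.List.pyGetD st.1 q.1 1 == 0) then
            (PySem.List.pySetD st.1 q.1 i, st.2 ++ [q.1])
          else st)
        = stepf min_width i (fun s x => s ++ [x]) := by
        funext st q; rw [stepf, Bool.and_comm]
      rw [hf]
      exact ih _ _

theorem gv_getElem (W : List Int) (k : Nat) (h : k < W.length) : gv W (k : Int) = W[k] := by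
  rw [gv, PySem.List.pyGetD_eq_getElem W 1 (by omega) (by omega)]
  simp

theorem gv_set (W : List Int) (m j x : Int) (hm0 : 0 ≤ m) (hm1 : m < (W.length : Int)) (hj0 : 0 ≤ j) :
    gv (PySem.List.pySetD W m x) j = if j = m then x else gv W j := by
  have hm : m = ((m.toNat : Nat) : Int) := by omega
  have hj : j = ((j.toNat : Nat) : Int) := by omega
  rw [gv, gv, hm, hj, PySem.List.pyGetD_pySetD_natCast _ _ _ _ _ (by omega)]
  split_ifs with h1 h2 h2 <;> first | rfl | (exfalso; omega)

theorem zc_set (W : List Int) (m x : Int) (hm0 : 0 ≤ m) (hm1 : m < (W.length : Int))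
    (h0 : gv W m = 0) (hx : x ≠ 0) : zc (PySem.List.pySetD W m x) + 1 = zc W := by
  have hk : m.toNat < W.length := by omega
  have hg : W[m.toNat] = 0 := by
    have := gv_getElem W m.toNat hk
    rw [gv] at this h0
    have hm : ((m.toNat : Nat) : Int) = m := by omega
    rw [hm] at this; omega
  rw [zc, zc, PySem.List.pySetD_of_nonneg _ _ hm0, List.countP_set hk]
  have hpos : 0 < List.countP (fun x : Int => x == 0) W :=
    List.countP_pos_iff.mpr ⟨W[m.toNat], List.getElem_mem hk, by simp [hg]⟩
  simp [hg, hx]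
  omega

theorem reach_bounds (adj : List (Int × List (Int × Int))) (min_width : Int) (n : Nat) (V : List Int)
    (i : Int) (hadj : AdjOK adj min_width n) (hi1 : 1 ≤ i) (hi2 : i ≤ (n : Int)) :
    ∀ j : Int, Reach adj min_width V i j → 1 ≤ j ∧ j ≤ (n : Int) := by
  intro j h
  induction h with
  | base => exact ⟨hi1, hi2⟩
  | step hu hmem hw hV0 ih => exact hadj _ ih.1 ih.2 _ hmem hw

theorem closed_complete (adj : List (Int × List (Int × Int))) (min_width : Int) (n : Nat)
    (V : List Int) (i : Int) (W : List Int)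
    (hadj : AdjOK adj min_width n) (hi1 : 1 ≤ i) (hi2 : i ≤ (n : Int))
    (hpt : ∀ j : Int, 0 ≤ j → j ≤ (n : Int) → gv W j = gv V j ∨ (gv W j = i ∧ Reach adj min_width V i j))
    (hroot : gv W i = i)
    (hcl : ∀ u : Int, 1 ≤ u → u ≤ (n : Int) → gv W u = i → ClosedAt adj min_width W u) :
    ∀ j : Int, Reach adj min_width V i j → gv W j = i := by
  intro j h
  induction h with
  | base => exact hroot
  | @step u m w hu hmem hw hV0 ih =>
    have hub := reach_bounds adj min_width n V i hadj hi1 hi2 u hu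
    have hmb := hadj u hub.1 hub.2 (m, w) hmem hw
    have hne := hcl u hub.1 hub.2 ih (m, w) hmem hw
    rcases hpt m (by omega) hmb.2 with h1 | h2
    · exact absurd (h1.trans hV0) hne
    · exact h2.1

theorem fold_post (adj : List (Int × List (Int × Int))) (min_width : Int) (n : Nat) (i : Int)
    (V : List Int) (push : List Int → Int → List Int)
    (hpm : ∀ s x y, y ∈ push s x ↔ y = x ∨ y ∈ s)
    (hpn : ∀ s x, s.Nodup → x ∉ s → (push s x).Nodup)
    (hpl : ∀ s x, (push s x).length = s.length + 1)
    (hadj : AdjOK adj min_width n) (hi1 : 1 ≤ i) (hi2 : i ≤ (n : Int)) (hnV : V.length = n + 1) :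
    ∀ (L : List (Int × Int)) (W st : List Int) (v : Int) (W' st' : List Int),
    L.foldl (stepf min_width i push) (W, st) = (W', st') →
    (∀ q ∈ L, q ∈ lookupAdj adj v) →
    Reach adj min_width V i v → gv W v = i → v ∉ st →
    LoopInv adj min_width n V i W st →
    (∀ u : Int, 1 ≤ u → u ≤ (n : Int) → gv W u = i → u ∉ st → u ≠ v → ClosedAt adj min_width W u) →
    LoopInv adj min_width n V i W' st' ∧
    gv W' v = i ∧ v ∉ st' ∧
    (∀ j : Int, 0 ≤ j → gv W j ≠ 0 → gv W' j = gv W j) ∧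
    (∀ u : Int, 1 ≤ u → u ≤ (n : Int) → gv W' u = i → u ∉ st' → u ≠ v → ClosedAt adj min_width W' u) ∧
    (∀ q ∈ L, min_width ≤ q.2 → gv W' q.1 ≠ 0) ∧
    2 * zc W' + st'.length ≤ 2 * zc W + st.length := by
  intro L
  induction L with
  | nil =>
    intro W st v W' st' heq hsub hrv hmv hvn hInv hcl
    rw [List.foldl_nil] at heq
    injection heq with h1 h2
    subst h1; subst h2
    exact ⟨hInv, hmv, hvn, fun j _ h => rfl, hcl, by simp, le_refl _⟩
  | cons q L ih =>
    intro W st v W' st' heq hsub hrv hmv hvn hInv hcl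
    obtain ⟨hlen, hpt, hst, hnd, hroot⟩ := hInv
    have hvb := reach_bounds adj min_width n V i hadj hi1 hi2 v hrv
    have hqv : q ∈ lookupAdj adj v := hsub q (List.mem_cons_self ..)
    rw [List.foldl_cons] at heq
    by_cases hc : (PySem.List.pyGetD W q.1 1 == 0 && decide (q.2 ≥ min_width)) = true
    · -- the edge fires: label q.1 and push it
      have hq0 : gv W q.1 = 0 := by
        have := (Bool.and_eq_true ..).mp hc
        exact beq_iff_eq.mp this.1
      have hw : min_width ≤ q.2 := by
        have := (Bool.and_eq_true ..).mp hc
        exact of_decide_eq_true this.2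
      have hmb := hadj v hvb.1 hvb.2 q hqv hw
      have hm_lt : q.1 < (W.length : Int) := by rw [hlen, hnV]; omega
      have hstep : stepf min_width i push (W, st) q =
          (PySem.List.pySetD W q.1 i, push st q.1) := by
        rw [stepf]; simp only [hc]; rfl
      rw [hstep] at heq
      have hgset : ∀ j : Int, 0 ≤ j →
          gv (PySem.List.pySetD W q.1 i) j = if j = q.1 then i else gv W j :=
        fun j hj => gv_set W q.1 j i (by omega) hm_lt hj
      have hine : i ≠ 0 := by omega
      have hVm0 : gv V q.1 = 0 := by
        rcases hpt q.1 (by omega) hmb.2 with h1 | h2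
        · omega
        · omega
      have hrm : Reach adj min_width V i q.1 := Reach.step hrv hqv hw hVm0
      have hmnotst : q.1 ∉ st := fun hmem => by
        have := (hst q.1 hmem).2.2.2; omega
      have hmnev : q.1 ≠ v := fun h => by rw [h] at hq0; omega
      have hmnei : q.1 ≠ i := fun h => by rw [h] at hq0; omega
      have hW1m : gv (PySem.List.pySetD W q.1 i) q.1 = i := by
        rw [hgset q.1 (by omega)]; simp
      have hInv1 : LoopInv adj min_width n V i (PySem.List.pySetD W q.1 i) (push st q.1) := by
        refine ⟨by rw [PySem.List.length_pySetD, hlen], ?_, ?_, hpn st q.1 hnd hmnotst, ?_⟩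
        · intro j hj0 hjn
          rw [hgset j hj0]
          by_cases hj : j = q.1
          · subst hj; simp [hrm]
          · simp only [if_neg hj]; exact hpt j hj0 hjn
        · intro y hy
          rcases (hpm st q.1 y).mp hy with rfl | hy'
          · exact ⟨by omega, hmb.2, hrm, hW1m⟩
          · have h4 := hst y hy'
            have : y ≠ q.1 := fun h => by rw [h] at h4; omega
            rw [hgset y (by omega)]
            simp only [if_neg this]
            exact h4
        · rw [hgset i (by omega), if_neg (fun h => hmnei h.symm)]; exact hroot
      have hcl1 : ∀ u : Int, 1 ≤ u → u ≤ (n : Int) →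
          gv (PySem.List.pySetD W q.1 i) u = i → u ∉ push st q.1 → u ≠ v →
          ClosedAt adj min_width (PySem.List.pySetD W q.1 i) u := by
        intro u hu1 hu2 hgu hust hune
        have hunem : u ≠ q.1 := fun h => hust ((hpm st q.1 u).mpr (Or.inl h))
        rw [hgset u (by omega), if_neg hunem] at hgu
        have hust' : u ∉ st := fun h => hust ((hpm st q.1 u).mpr (Or.inr h))
        have hclu := hcl u hu1 hu2 hgu hust' hune
        intro r hr hwr
        have hrb := hadj u hu1 hu2 r hr hwr
        rw [hgset r.1 (by omega)]
        by_cases h : r.1 = q.1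
        · simp [h, hine]
        · simp only [if_neg h]; exact hclu r hr hwr
      have hres := ih (PySem.List.pySetD W q.1 i) (push st q.1) v W' st' heq
        (fun r hr => hsub r (List.mem_cons_of_mem _ hr))
        hrv
        (by rw [hgset v (by omega), if_neg (fun h => hmnev h.symm)]; exact hmv)
        (fun h => by
          rcases (hpm st q.1 v).mp h with h' | h'
          · exact hmnev h'.symm
          · exact hvn h')
        hInv1 hcl1
      obtain ⟨rInv, rmv, rvn, rmono, rcl, rdone, rfuel⟩ := hres
      have hmono : ∀ j : Int, 0 ≤ j → gv W j ≠ 0 → gv W' j = gv W j := by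
        intro j hj0 hjne
        have hjq : j ≠ q.1 := fun h => by rw [h] at hjne; omega
        have h1 : gv (PySem.List.pySetD W q.1 i) j = gv W j := by
          rw [hgset j hj0, if_neg hjq]
        rw [← h1]
        exact rmono j hj0 (by rw [h1]; exact hjne)
      refine ⟨rInv, rmv, rvn, hmono, rcl, ?_, ?_⟩
      · intro r hr hwr
        rcases List.mem_cons.mp hr with rfl | hr'
        · have := rmono r.1 (by omega) (by rw [hW1m]; omega)
          rw [this, hW1m]; omega
        · exact rdone r hr' hwr
      · have hzc := zc_set W q.1 i (by omega) hm_lt hq0 hine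
        have hl := hpl st q.1
        omega
    · -- the edge does not fire
      have hstep : stepf min_width i push (W, st) q = (W, st) := by
        rw [stepf]; simp only [hc]; rfl
      rw [hstep] at heq
      have hres := ih W st v W' st' heq
        (fun r hr => hsub r (List.mem_cons_of_mem _ hr))
        hrv hmv hvn ⟨hlen, hpt, hst, hnd, hroot⟩ hcl
      obtain ⟨rInv, rmv, rvn, rmono, rcl, rdone, rfuel⟩ := hres
      refine ⟨rInv, rmv, rvn, rmono, rcl, ?_, rfuel⟩
      intro r hr hwr
      rcases List.mem_cons.mp hr with rfl | hr'
      · have hq0 : gv W r.1 ≠ 0 := by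
          intro h0
          apply hc
          rw [Bool.and_eq_true]
          refine ⟨beq_iff_eq.mpr h0, decide_eq_true hwr⟩
        have hrb := hadj v hvb.1 hvb.2 r hqv hwr
        rw [rmono r.1 (by omega) hq0]
        exact hq0
      · exact rdone r hr' hwr

theorem wl_post (adj : List (Int × List (Int × Int))) (min_width : Int) (n : Nat) (i : Int)
    (V : List Int) (push : List Int → Int → List Int)
    (hpm : ∀ s x y, y ∈ push s x ↔ y = x ∨ y ∈ s)
    (hpn : ∀ s x, s.Nodup → x ∉ s → (push s x).Nodup)
    (hpl : ∀ s x, (push s x).length = s.length + 1)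
    (hadj : AdjOK adj min_width n) (hi1 : 1 ≤ i) (hi2 : i ≤ (n : Int)) (hnV : V.length = n + 1) :
    ∀ (fuel : Nat) (W st : List Int),
    LoopInv adj min_width n V i W st →
    (∀ u : Int, 1 ≤ u → u ≤ (n : Int) → gv W u = i → u ∉ st → ClosedAt adj min_width W u) →
    2 * zc W + st.length ≤ fuel →
    (wl adj min_width i push fuel W st).length = V.length ∧
    (∀ j : Int, 0 ≤ j → j ≤ (n : Int) →
      gv (wl adj min_width i push fuel W st) j = gv V j ∨ gv (wl adj min_width i push fuel W st) j = i) ∧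
    (∀ j : Int, Reach adj min_width V i j → gv (wl adj min_width i push fuel W st) j = i) ∧
    (∀ j : Int, 0 ≤ j → j ≤ (n : Int) → ¬ Reach adj min_width V i j →
      gv (wl adj min_width i push fuel W st) j = gv V j) := by
  intro fuel
  induction fuel with
  | zero =>
    intro W st hInv hcl hfuel
    obtain ⟨hlen, hpt, hst, hnd, hroot⟩ := hInv
    have hst0 : st = [] := List.eq_nil_of_length_eq_zero (by omega)
    subst hst0
    have hcomp := closed_complete adj min_width n V i W hadj hi1 hi2 hpt hroot
      (fun u h1 h2 h3 => hcl u h1 h2 h3 (by simp))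
    refine ⟨hlen, ?_, hcomp, ?_⟩
    · intro j hj0 hjn
      rcases hpt j hj0 hjn with h | h
      · exact Or.inl h
      · exact Or.inr h.1
    · intro j hj0 hjn hnr
      rcases hpt j hj0 hjn with h | h
      · exact h
      · exact absurd h.2 hnr
  | succ f ih =>
    intro W st hInv hcl hfuel
    cases st with
    | nil =>
      obtain ⟨hlen, hpt, hst, hnd, hroot⟩ := hInv
      have hcomp := closed_complete adj min_width n V i W hadj hi1 hi2 hpt hroot
        (fun u h1 h2 h3 => hcl u h1 h2 h3 (by simp))
      refine ⟨hlen, ?_, hcomp, ?_⟩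
      · intro j hj0 hjn
        rcases hpt j hj0 hjn with h | h
        · exact Or.inl h
        · exact Or.inr h.1
      · intro j hj0 hjn hnr
        rcases hpt j hj0 hjn with h | h
        · exact h
        · exact absurd h.2 hnr
    | cons v rest =>
      obtain ⟨hlen, hpt, hst, hnd, hroot⟩ := hInv
      have hv := hst v (List.mem_cons_self ..)
      have hvrest : v ∉ rest := (List.nodup_cons.mp hnd).1
      have hndrest : rest.Nodup := (List.nodup_cons.mp hnd).2
      have hfold := fold_post adj min_width n i V push hpm hpn hpl hadj hi1 hi2 hnV
        (lookupAdj adj v) W rest v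
        ((lookupAdj adj v).foldl (stepf min_width i push) (W, rest)).1
        ((lookupAdj adj v).foldl (stepf min_width i push) (W, rest)).2
        (by rw [Prod.mk.eta])
        (fun r hr => hr)
        hv.2.2.1 hv.2.2.2
        hvrest
        ⟨hlen, hpt, fun y hy => hst y (List.mem_cons_of_mem _ hy), hndrest, hroot⟩
        (fun u h1 h2 h3 h4 h5 => hcl u h1 h2 h3 (by
          intro hmem
          rcases List.mem_cons.mp hmem with h | h
          · exact h5 h
          · exact h4 h))
      obtain ⟨rInv, rmv, rvn, rmono, rcl, rdone, rfuel⟩ := hfold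
      have hwl : wl adj min_width i push (f + 1) W (v :: rest) =
          wl adj min_width i push f
            ((lookupAdj adj v).foldl (stepf min_width i push) (W, rest)).1
            ((lookupAdj adj v).foldl (stepf min_width i push) (W, rest)).2 := rfl
      rw [hwl]
      apply ih _ _ rInv
      · intro u h1 h2 h3 h4
        by_cases huv : u = v
        · subst huv
          intro r hr hwr
          exact rdone r hr hwr
        · exact rcl u h1 h2 h3 h4 huv
      · have : rest.length + 1 = (v :: rest).length := by simp
        omega

theorem phase_eq (adj : List (Int × List (Int × Int))) (min_width : Int) (n : Nat) (i : Int)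
    (V : List Int) (hadj : AdjOK adj min_width n) (hi1 : 1 ≤ i) (hi2 : i ≤ (n : Int))
    (hnV : V.length = n + 1) (hVi0 : gv V i = 0)
    (hclean : ∀ j : Int, 0 ≤ j → j ≤ (n : Int) → gv V j ≠ i) :
    stackLoop adj min_width i (2 * V.length + 1) (PySem.List.pySetD V i i) [i] =
      bfsLoop adj min_width i (2 * V.length + 1) (PySem.List.pySetD V i i) [i] ∧
    (stackLoop adj min_width i (2 * V.length + 1) (PySem.List.pySetD V i i) [i]).length = V.length ∧
    (∀ j : Int, 0 ≤ j → j ≤ (n : Int) →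
      gv (stackLoop adj min_width i (2 * V.length + 1) (PySem.List.pySetD V i i) [i]) j = gv V j ∨
      gv (stackLoop adj min_width i (2 * V.length + 1) (PySem.List.pySetD V i i) [i]) j = i) := by
  have hilt : i < (V.length : Int) := by rw [hnV]; omega
  have hgset : ∀ j : Int, 0 ≤ j →
      gv (PySem.List.pySetD V i i) j = if j = i then i else gv V j :=
    fun j hj => gv_set V i j i (by omega) hilt hj
  have hW0i : gv (PySem.List.pySetD V i i) i = i := by rw [hgset i (by omega)]; simp
  have hInv0 : LoopInv adj min_width n V i (PySem.List.pySetD V i i) [i] := by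
    refine ⟨PySem.List.length_pySetD .., ?_, ?_, List.nodup_singleton i, hW0i⟩
    · intro j hj0 hjn
      rw [hgset j hj0]
      by_cases hj : j = i
      · subst hj; rw [if_pos rfl]; exact Or.inr ⟨rfl, Reach.base⟩
      · rw [if_neg hj]; exact Or.inl rfl
    · intro y hy
      rw [List.mem_singleton] at hy
      subst hy
      exact ⟨hi1, hi2, Reach.base, hW0i⟩
  have hcl0 : ∀ u : Int, 1 ≤ u → u ≤ (n : Int) → gv (PySem.List.pySetD V i i) u = i →
      u ∉ [i] → ClosedAt adj min_width (PySem.List.pySetD V i i) u := by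
    intro u h1 h2 h3 h4
    have hune : u ≠ i := fun h => h4 (by rw [h]; exact List.mem_singleton.mpr rfl)
    rw [hgset u (by omega), if_neg hune] at h3
    exact absurd h3 (hclean u (by omega) h2)
  have hfuel : 2 * zc (PySem.List.pySetD V i i) + 1 ≤ 2 * V.length + 1 := by
    have h1 : zc (PySem.List.pySetD V i i) ≤ (PySem.List.pySetD V i i).length := by
      rw [zc]; exact List.countP_le_length
    rw [PySem.List.length_pySetD] at h1
    omega
  have hA := wl_post adj min_width n i V (fun s x => x :: s)
    (fun s x y => List.mem_cons)
    (fun s x hs hx => List.nodup_cons.mpr ⟨hx, hs⟩)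
    (fun s x => by simp)
    hadj hi1 hi2 hnV (2 * V.length + 1) (PySem.List.pySetD V i i) [i] hInv0 hcl0 (by simpa using hfuel)
  have hB := wl_post adj min_width n i V (fun s x => s ++ [x])
    (fun s x y => by simp [List.mem_append, or_comm])
    (fun s x hs hx => by
      simp [List.nodup_append, hs]
      intro a ha h
      subst h
      exact hx ha)
    (fun s x => by simp)
    hadj hi1 hi2 hnV (2 * V.length + 1) (PySem.List.pySetD V i i) [i] hInv0 hcl0 (by simpa using hfuel)
  rw [stackLoop_eq_wl, bfsLoop_eq_wl]
  refine ⟨?_, hA.1, fun j h0 hn => hA.2.1 j h0 hn⟩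
  apply List.ext_getElem (hA.1.trans hB.1.symm)
  intro k h1 h2
  have hkn : (k : Int) ≤ (n : Int) := by
    have := hA.1
    omega
  by_cases hr : Reach adj min_width V i (k : Int)
  · rw [← gv_getElem _ k h1, ← gv_getElem _ k h2, hA.2.2.1 _ hr, hB.2.2.1 _ hr]
  · rw [← gv_getElem _ k h1, ← gv_getElem _ k h2,
      hA.2.2.2 _ (by omega) hkn hr, hB.2.2.2 _ (by omega) hkn hr]

theorem outer_eq (adj : List (Int × List (Int × Int))) (min_width : Int) (n : Nat)
    (hadj : AdjOK adj min_width n) :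
    ∀ (k : Nat) (i0 : Int) (V : List Int), ((n : Int) + 1 - i0).toNat = k → 1 ≤ i0 →
    V.length = n + 1 →
    (∀ j : Int, 0 ≤ j → j ≤ (n : Int) → 0 ≤ gv V j ∧ gv V j < i0) →
    (PySem.List.pyRange i0 ((n : Int) + 1) 1).foldl
      (fun visited i =>
        if PySem.List.pyGetD visited i 1 == 0 then
          stackLoop adj min_width i (2 * visited.length + 1) (PySem.List.pySetD visited i i) [i]
        else visited) V =
    (PySem.List.pyRange i0 ((n : Int) + 1) 1).foldl
      (fun label root =>
        if PySem.List.pyGetD label root 1 == 0 then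
          bfsLoop adj min_width root (2 * label.length + 1) (PySem.List.pySetD label root root) [root]
        else label) V := by
  intro k
  induction k with
  | zero =>
    intro i0 V hk h1 hlen hinv
    have hle : (n : Int) + 1 ≤ i0 := by omega
    rw [PySem.List.pyRange_one_eq_nil hle]
    rfl
  | succ k ih =>
    intro i0 V hk h1 hlen hinv
    have hlt : i0 < (n : Int) + 1 := by omega
    rw [PySem.List.pyRange_one_cons hlt, List.foldl_cons, List.foldl_cons]
    by_cases h0 : (PySem.List.pyGetD V i0 1 == 0) = true
    · have hg : gv V i0 = 0 := beq_iff_eq.mp h0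
      have hpe := phase_eq adj min_width n i0 V hadj h1 (by omega) hlen hg
        (fun j hj0 hjn => by have := hinv j hj0 hjn; omega)
      simp only [h0, if_true]
      rw [← hpe.1]
      exact ih (i0 + 1)
        (stackLoop adj min_width i0 (2 * V.length + 1) (PySem.List.pySetD V i0 i0) [i0])
        (by omega) (by omega) (hpe.2.1.trans hlen)
        (fun j hj0 hjn => by
          rcases hpe.2.2 j hj0 hjn with h | h
          · have := hinv j hj0 hjn; omega
          · omega)
    · simp only [Bool.not_eq_true] at h0
      simp only [h0, Bool.false_eq_true, if_false]
      exact ih (i0 + 1) V (by omega) (by omega) hlen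
        (fun j hj0 hjn => by have := hinv j hj0 hjn; omega)

theorem checkPairs_eq_all (W : List Int) :
    ∀ l : List (Int × Int), checkPairs W l =
      l.all (fun p => PySem.List.pyGetD W (p.1 + 1) 0 == PySem.List.pyGetD W p.2 0) := by
  intro l
  induction l with
  | nil => rfl
  | cons p rest ih =>
    obtain ⟨j, v⟩ := p
    rw [checkPairs, List.all_cons]
    split_ifs with h
    · simp only [ih]; simp [h]
    · simp [h]

theorem pre_adjOK (adj : List (Int × List (Int × Int))) (arr : List Int) (min_width : Int)
    (h : Pre_check adj arr min_width) : AdjOK adj min_width arr.length := by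
  intro u hu1 hu2 q hq hw
  obtain ⟨-, h2, -⟩ := h
  unfold lookupAdj at hq
  cases hf : adj.find? (fun p => p.1 == u) with
  | none => rw [hf] at hq; simp at hq
  | some p =>
    rw [hf] at hq
    have hmem := List.mem_of_find?_eq_some hf
    have hpu : p.1 = u := by
      have := List.find?_some hf
      simpa using this
    have := h2 p hmem (by omega) (by omega) q hq
    exact ⟨this.2.2 hw, this.2.1⟩

-- ===== VERDICT (by name: the statement is the Claim_ definition above) =====
theorem check_spec : Claim_equal_check := by
  unfold Claim_equal_check
  intro adj arr min_width hdom hpre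
  unfold Spec_check
  simp only [check, check_alt, PySem.List.len_eq]
  have hadj := pre_adjOK adj arr min_width hpre
  have hrep : ∀ j : Int, 0 ≤ j → j ≤ (arr.length : Int) →
      0 ≤ gv (List.replicate (arr.length + 1) (0 : Int)) j ∧
      gv (List.replicate (arr.length + 1) (0 : Int)) j < 1 := by
    intro j hj0 hjn
    have hk : j.toNat < arr.length + 1 := by omega
    have hg : gv (List.replicate (arr.length + 1) (0 : Int)) j = 0 := by
      have h := gv_getElem (List.replicate (arr.length + 1) (0 : Int)) j.toNat (by simpa using hk)
      rw [List.getElem_replicate] at h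
      have hj : ((j.toNat : Nat) : Int) = j := by omega
      rw [hj] at h
      exact h
    omega
  have houter := outer_eq adj min_width arr.length hadj ((arr.length : Int) + 1 - 1).toNat 1
    (List.replicate (arr.length + 1) 0) rfl (by omega) (by simp) hrep
  rw [houter, checkPairs_eq_all]
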